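-- pv_equiv track=rewrite | github.com/btc-z/btc-z.github.io | scripts/process_coffee_log.py | parse_issue_body
-- ===== SOURCE A (Python) =====
-- def parse_issue_body(body):
--     """Parse GitHub Issue form body into a dictionary of field values."""
--     data = {}
--     lines = body.split('\n')
--     current_key = None
--     current_value = []
--
--     for line in lines:
--         line = line.strip()
--         # 1. New Field Key (### Label)
--         if line.startswith('### '):
--             if current_key:
--                 data[current_key] = '\n'.join(current_value).strip()
--             current_key = line[4:].strip()
--             current_value = []
--         # 2. Ignore Section Headers (## Header) inserted by Template
--         elif line.startswith('## '):
--             continue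
--         # 3. Capture Value
--         else:
--             if line:
--                 current_value.append(line)
--
--     if current_key:
--         data[current_key] = '\n'.join(current_value).strip()
--     return data
-- ===== SOURCE B (Python) =====
-- def parse_issue_body(body):
--     """Parse GitHub Issue form body into a dictionary of field values."""
--     stripped = [l.strip() for l in body.split('\n')]
--
--     def is_header(l):
--         return l.startswith('### ')
--
--     # discard everything before the first field header
--     while stripped and not is_header(stripped[0]):
--         stripped.pop(0)
--
--     data = {}
--     while stripped:
--         header, rest = stripped[0], stripped[1:]
--         n = 0
--         while n < len(rest) and not is_header(rest[n]):
--             n += 1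
--         seg = rest[:n]
--         data[header[4:].strip()] = '\n'.join(
--             l for l in seg if l and not l.startswith('## '))
--         stripped = rest[n:]
--     return data
-- ===== Notes on version B (the rewrite author's own statement) =====
-- stated objective: alternative
-- what changed: Replaces A's single stateful line loop (current_key/current_value accumulators with flush-on-header and a trailing flush) by a segment decomposition: strip all lines once, drop everything before the first '### ' header, partition the rest into header-led segments with takeWhile/dropWhile, and build each field value with one filter+join per segment.
import Mathlib
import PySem

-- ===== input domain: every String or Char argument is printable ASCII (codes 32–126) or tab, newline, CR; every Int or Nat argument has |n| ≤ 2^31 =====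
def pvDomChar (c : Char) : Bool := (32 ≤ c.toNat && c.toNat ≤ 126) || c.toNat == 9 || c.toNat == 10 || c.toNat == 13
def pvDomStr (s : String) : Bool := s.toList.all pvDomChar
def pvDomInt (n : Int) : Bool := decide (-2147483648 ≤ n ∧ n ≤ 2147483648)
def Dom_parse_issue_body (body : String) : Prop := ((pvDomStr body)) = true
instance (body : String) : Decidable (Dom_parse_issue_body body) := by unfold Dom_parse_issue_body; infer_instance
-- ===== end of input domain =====

-- B re-implements A by a different decomposition: it strips all lines once, drops the pre-header
-- prefix, partitions the lines into header-led segments with takeWhile/dropWhile and builds each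
-- value by one filter+join, instead of A's single stateful line-by-line accumulator loop.

-- ===== PORT A =====
-- flush value: '\n'.join(current_value).strip()
def pvFlushVal (vals : List String) : String :=
  PySem.Str.strip (PySem.Str.join "\n" vals)

-- one iteration of A's for-loop; state = (data, current_key, current_value); line already bound to line.strip()
def pvStepA (st : PySem.Dict String String × Option String × List String) (raw : String) :
    PySem.Dict String String × Option String × List String :=
  let line := PySem.Str.strip raw
  let (d, key?, vals) := st
  if PySem.Str.startswith line "### " then
    let d' := match key? with
      | some k => if k == "" then d else d.insert k (pvFlushVal vals)   -- `if current_key:` (truthiness)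
      | none => d
    (d', some (PySem.Str.strip (PySem.Str.slice line (some 4) none)), [])
  else if PySem.Str.startswith line "## " then
    (d, key?, vals)
  else
    if line == "" then (d, key?, vals) else (d, key?, vals ++ [line])

def parse_issue_body (body : String) : List (String × String) :=
  let lines := (PySem.Str.split? body "\n").getD []   -- body.split('\n'); sep ≠ "" so always some
  let st := lines.foldl pvStepA (PySem.Dict.empty, none, [])
  (match st.2.1 with
    | some k => if k == "" then st.1 else st.1.insert k (pvFlushVal st.2.2)
    | none => st.1).items

-- ===== PORT B =====
def pvIsHeader (l : String) : Bool := PySem.Str.startswith l "### "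

def pvKeyOf (l : String) : String := PySem.Str.strip (PySem.Str.slice l (some 4) none)

def pvValOf (seg : List String) : String :=
  PySem.Str.join "\n" (seg.filter (fun l => !(l == "") && !(PySem.Str.startswith l "## ")))

-- segment the (stripped) lines at '### ' headers; first line is a header
def pvSegs : List String → List (String × String)
  | [] => []
  | h :: rest =>
      (pvKeyOf h, pvValOf (rest.takeWhile (fun l => !pvIsHeader l))) ::
        pvSegs (rest.dropWhile (fun l => !pvIsHeader l))
termination_by ls => ls.length
decreasing_by
  simp only [List.length_cons]
  exact Nat.lt_succ_of_le (List.length_dropWhile_le _ _)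

def parse_issue_body_alt (body : String) : List (String × String) :=
  let stripped := ((PySem.Str.split? body "\n").getD []).map PySem.Str.strip
  ((pvSegs (stripped.dropWhile (fun l => !pvIsHeader l))).foldl
      (fun d kv => d.insert kv.1 kv.2) (PySem.Dict.empty : PySem.Dict String String)).items

-- ===== PRECONDITION & SPEC =====
def Spec_parse_issue_body (body : String) (out : List (String × String)) : Prop := out = parse_issue_body_alt body
instance (body : String) (out : List (String × String)) : Decidable (Spec_parse_issue_body body out) := by unfold Spec_parse_issue_body; infer_instance

-- ===== CLAIM (what is proved, stated in full; the proofs are below) =====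
def Claim_equal_parse_issue_body : Prop := ∀ (body : String), Dom_parse_issue_body body → Spec_parse_issue_body body (parse_issue_body body)

-- ===== LEMMAS AND PROOFS =====

-- dropWhile basics
theorem pvDW_cons_eq {α : Type} (p : α → Bool) (c : α) (t : List α)
    (h : List.dropWhile p (c :: t) = c :: t) : p c = false := by
  by_cases hc : p c = true
  · have := List.length_dropWhile_le p t
    rw [List.dropWhile_cons, if_pos hc] at h
    have := congrArg List.length h
    simp at this
    omega
  · simpa using hc

theorem pvDW_append {α : Type} (p : α → Bool) (x y : List α)
    (h : List.dropWhile p x = x) (hx : x ≠ []) :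
    List.dropWhile p (x ++ y) = x ++ y := by
  cases x with
  | nil => exact absurd rfl hx
  | cons c t =>
    have hc := pvDW_cons_eq p c t h
    simp [List.dropWhile_cons, hc]

theorem pvDW_idem {α : Type} (p : α → Bool) (l : List α) :
    List.dropWhile p (List.dropWhile p l) = List.dropWhile p l := by
  cases h : List.dropWhile p l with
  | nil => simp
  | cons c t =>
    have hc : p c = false := by
      have := List.head?_dropWhile_not p l
      rw [h] at this
      simpa using this
    simp [List.dropWhile_cons, hc]

-- rstrip as a dropWhile on the reverse
theorem pvRstrip_eq_iff (b : List Char) :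
    PySem.Chars.rstrip b = b ↔ List.dropWhile PySem.Chars.isspace b.reverse = b.reverse := by
  unfold PySem.Chars.rstrip
  constructor
  · intro h
    have := congrArg List.reverse h
    simpa using this
  · intro h
    rw [h]; simp

theorem pvLstrip_prefix (z y : List Char) (h : PySem.Chars.lstrip z = z) (hp : y <+: z) :
    PySem.Chars.lstrip y = y := by
  unfold PySem.Chars.lstrip at *
  cases y with
  | nil => simp
  | cons c t =>
    obtain ⟨r, hr⟩ := hp
    subst hr
    have hc := pvDW_cons_eq _ _ _ h
    simp [List.dropWhile_cons, hc]

theorem pvRstrip_idem (s : List Char) :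
    PySem.Chars.rstrip (PySem.Chars.rstrip s) = PySem.Chars.rstrip s := by
  unfold PySem.Chars.rstrip
  simp [pvDW_idem]

theorem pvLstrip_rstrip (s : List Char) (h : PySem.Chars.lstrip s = s) :
    PySem.Chars.lstrip (PySem.Chars.rstrip s) = PySem.Chars.rstrip s := by
  apply pvLstrip_prefix s _ h
  have hsuf : List.dropWhile PySem.Chars.isspace s.reverse <:+ s.reverse :=
    List.dropWhile_suffix _
  have h2 := (List.reverse_prefix (l₁ := List.dropWhile PySem.Chars.isspace s.reverse)
      (l₂ := s.reverse)).mpr hsuf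
  simpa [PySem.Chars.rstrip] using h2

theorem pvLstrip_idem (s : List Char) :
    PySem.Chars.lstrip (PySem.Chars.lstrip s) = PySem.Chars.lstrip s := by
  unfold PySem.Chars.lstrip
  simp [pvDW_idem]

theorem pvStripC_idem (s : List Char) :
    PySem.Chars.strip (PySem.Chars.strip s) = PySem.Chars.strip s := by
  unfold PySem.Chars.strip
  rw [pvLstrip_rstrip _ (pvLstrip_idem s), pvRstrip_idem]

-- strip-fixed gives both one-sided fixeds
theorem pvStripC_fixed (w : List Char) (h : PySem.Chars.strip w = w) :
    PySem.Chars.lstrip w = w ∧ PySem.Chars.rstrip w = w := by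
  have hl : PySem.Chars.lstrip w = w := by
    have h1 : (PySem.Chars.lstrip w).length ≤ w.length := by
      unfold PySem.Chars.lstrip; exact List.length_dropWhile_le _ _
    have h2 : w.length ≤ (PySem.Chars.lstrip w).length := by
      conv_lhs => rw [← h]
      unfold PySem.Chars.strip PySem.Chars.rstrip
      calc (PySem.Chars.rstrip (PySem.Chars.lstrip w)).length
          ≤ (PySem.Chars.lstrip w).reverse.length := by
            unfold PySem.Chars.rstrip
            simpa using List.length_dropWhile_le PySem.Chars.isspace (PySem.Chars.lstrip w).reverse
        _ = (PySem.Chars.lstrip w).length := by simp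
    have hsuf : PySem.Chars.lstrip w <:+ w := by
      unfold PySem.Chars.lstrip; exact List.dropWhile_suffix _
    exact hsuf.eq_of_length (by omega)
  refine ⟨hl, ?_⟩
  have := h
  unfold PySem.Chars.strip at this
  rw [hl] at this
  exact this

theorem pvRstrip_append (a b : List Char) (hb : PySem.Chars.rstrip b = b) (hbne : b ≠ []) :
    PySem.Chars.rstrip (a ++ b) = a ++ b := by
  rw [pvRstrip_eq_iff] at hb ⊢
  rw [List.reverse_append]
  exact pvDW_append _ _ _ hb (by simpa using hbne)

theorem pvLstrip_append (a b : List Char) (ha : PySem.Chars.lstrip a = a) (hane : a ≠ []) :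
    PySem.Chars.lstrip (a ++ b) = a ++ b := by
  unfold PySem.Chars.lstrip at *
  exact pvDW_append _ _ _ ha hane

theorem pvJoin_ne_nil (sep : List Char) (w : List Char) (t : List (List Char)) (hw : w ≠ []) :
    PySem.Chars.join sep (w :: t) ≠ [] := by
  cases t with
  | nil => simpa [PySem.Chars.join_singleton] using hw
  | cons q r =>
    rw [PySem.Chars.join_cons_cons]
    simp [hw]

theorem pvRstrip_join (vs : List (List Char))
    (hs : ∀ v ∈ vs, PySem.Chars.strip v = v ∧ v ≠ []) :
    PySem.Chars.rstrip (PySem.Chars.join ['\n'] vs) = PySem.Chars.join ['\n'] vs := by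
  induction vs with
  | nil => simp [PySem.Chars.join_nil, PySem.Chars.rstrip]
  | cons v t ih =>
    cases t with
    | nil =>
      rw [PySem.Chars.join_singleton]
      exact (pvStripC_fixed v (hs v (by simp)).1).2
    | cons q r =>
      rw [PySem.Chars.join_cons_cons, List.append_assoc]
      have hq := hs q (by simp)
      apply pvRstrip_append
      · exact pvRstrip_append _ _ (ih (fun x hx => hs x (by simp [hx]))) (pvJoin_ne_nil _ _ _ hq.2)
      · intro hcon
        exact pvJoin_ne_nil ['\n'] q r hq.2 (by simpa using (List.append_eq_nil_iff.mp hcon).2)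

theorem pvStrip_join (vs : List (List Char))
    (hs : ∀ v ∈ vs, PySem.Chars.strip v = v ∧ v ≠ []) :
    PySem.Chars.strip (PySem.Chars.join ['\n'] vs) = PySem.Chars.join ['\n'] vs := by
  unfold PySem.Chars.strip
  have hls : PySem.Chars.lstrip (PySem.Chars.join ['\n'] vs) = PySem.Chars.join ['\n'] vs := by
    cases vs with
    | nil => simp [PySem.Chars.join_nil, PySem.Chars.lstrip]
    | cons v t =>
      have hv := hs v (by simp)
      cases t with
      | nil =>
        rw [PySem.Chars.join_singleton]
        exact (pvStripC_fixed v hv.1).1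
      | cons q r =>
        rw [PySem.Chars.join_cons_cons, List.append_assoc]
        exact pvLstrip_append _ _ (pvStripC_fixed v hv.1).1 hv.2
  rw [hls]
  exact pvRstrip_join vs hs

theorem pvStrip_nil_all (r : List Char) (h : PySem.Chars.strip r = []) :
    ∀ c ∈ r, PySem.Chars.isspace c = true := by
  unfold PySem.Chars.strip PySem.Chars.rstrip at h
  have h1 : List.dropWhile PySem.Chars.isspace (PySem.Chars.lstrip r).reverse = [] := by
    have := congrArg List.reverse h
    simpa using this
  have h2 : ∀ c ∈ PySem.Chars.lstrip r, PySem.Chars.isspace c = true := by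
    intro c hc
    exact List.dropWhile_eq_nil_iff.mp h1 c (by simpa using hc)
  intro c hc
  have : c ∈ List.takeWhile PySem.Chars.isspace r ++ List.dropWhile PySem.Chars.isspace r := by
    rw [List.takeWhile_append_dropWhile]; exact hc
  rcases List.mem_append.mp this with h3 | h3
  · exact List.mem_takeWhile_imp h3
  · exact h2 c (by simpa [PySem.Chars.lstrip] using h3)

-- a stripped header line '### …' has a nonempty key after the marker
theorem pvHeaderKeyC_ne (l : List Char) (hs : PySem.Chars.strip l = l)
    (hh : PySem.Chars.startswith l ("### ".toList) = true) :
    PySem.Chars.strip (l.drop 4) ≠ [] := by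
  obtain ⟨r, hr⟩ := (PySem.Chars.startswith_iff l _).mp hh
  have h4 : "### ".toList.length = 4 := by decide
  have hdrop : l.drop 4 = r := by
    rw [← hr, ← h4, List.drop_left]
  rw [hdrop]
  intro hcon
  have hall := pvStrip_nil_all r hcon
  have hrs : PySem.Chars.rstrip l = l := (pvStripC_fixed l hs).2
  cases hrev : r.reverse with
  | nil =>
    have hrnil : r = [] := by simpa using congrArg List.reverse hrev
    rw [hrnil, List.append_nil] at hr
    rw [← hr] at hs
    exact absurd hs (by decide)
  | cons c t =>
    have hc : c ∈ r := by
      have : c ∈ r.reverse := by rw [hrev]; simp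
      simpa using this
    have hdw := (pvRstrip_eq_iff l).mp hrs
    rw [← hr, List.reverse_append, hrev] at hdw
    have hstep : List.dropWhile PySem.Chars.isspace (c :: (t ++ "### ".toList.reverse)) =
        c :: (t ++ "### ".toList.reverse) := by simpa using hdw
    have := pvDW_cons_eq PySem.Chars.isspace c (t ++ "### ".toList.reverse) hstep
    rw [hall c hc] at this
    exact absurd this (by decide)

-- String-level bridges
theorem pvStripped_iff (s : String) :
    PySem.Str.strip s = s ↔ PySem.Chars.strip s.toList = s.toList := by
  unfold PySem.Str.strip
  constructor
  · intro h
    have := congrArg String.toList h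
    simpa using this
  · intro h
    rw [h, String.ofList_toList]

theorem pvStrip_idem_str (s : String) :
    PySem.Str.strip (PySem.Str.strip s) = PySem.Str.strip s := by
  rw [pvStripped_iff]
  unfold PySem.Str.strip
  rw [String.toList_ofList]
  exact pvStripC_idem _

theorem pvFlush_eq (vals : List String)
    (h : ∀ v ∈ vals, PySem.Str.strip v = v ∧ v ≠ "") :
    pvFlushVal vals = PySem.Str.join "\n" vals := by
  unfold pvFlushVal PySem.Str.strip PySem.Str.join
  congr 1
  rw [String.toList_ofList]
  have : "\n".toList = ['\n'] := by decide
  rw [this]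
  apply pvStrip_join
  intro v hv
  obtain ⟨w, hw, hwv⟩ := List.mem_map.mp hv
  obtain ⟨h1, h2⟩ := h w hw
  subst hwv
  exact ⟨(pvStripped_iff w).mp h1, by simpa [String.toList_eq_nil_iff] using h2⟩

theorem pvKeyOf_ne (l : String) (hs : PySem.Str.strip l = l) (hh : pvIsHeader l = true) :
    pvKeyOf l ≠ "" := by
  intro hcon
  have h1 : (pvKeyOf l).toList = [] := by rw [hcon]; rfl
  unfold pvKeyOf PySem.Str.strip PySem.Str.slice at h1
  rw [String.toList_ofList, String.toList_ofList, PySem.Chars.slice_eq_listSlice] at h1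
  have h4 : (4 : Int) = ((4 : Nat) : Int) := by norm_num
  rw [h4, PySem.List.slice_from_natCast] at h1
  exact pvHeaderKeyC_ne l.toList ((pvStripped_iff l).mp hs)
    (by unfold pvIsHeader PySem.Str.startswith at hh; exact hh) h1

-- the trailing flush of A (match after the loop)
def pvFinish (st : PySem.Dict String String × Option String × List String) :
    PySem.Dict String String :=
  match st.2.1 with
  | some k => if k == "" then st.1 else st.1.insert k (pvFlushVal st.2.2)
  | none => st.1

theorem pvSegs_nil : pvSegs [] = [] := by rw [pvSegs]

theorem pvSegs_cons (h : String) (rest : List String) :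
    pvSegs (h :: rest) =
      (pvKeyOf h, pvValOf (rest.takeWhile (fun l => !pvIsHeader l))) ::
        pvSegs (rest.dropWhile (fun l => !pvIsHeader l)) := by
  rw [pvSegs]

theorem pvIsHeader_eq (l : String) :
    pvIsHeader l = PySem.Chars.startswith l.toList ['#', '#', '#', ' '] := by
  simp [pvIsHeader, PySem.Str.startswith]

-- Phase 1: a current key is open; A's remaining run equals B's fold over the remaining segments
theorem pvPhase1 (ls : List String) : ∀ (d : PySem.Dict String String) (k : String) (vals : List String),
    k ≠ "" → (∀ v ∈ vals, PySem.Str.strip v = v ∧ v ≠ "") → (∀ l ∈ ls, PySem.Str.strip l = l) →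
    pvFinish (ls.foldl pvStepA (d, some k, vals)) =
      ((k, PySem.Str.join "\n" (vals ++ (ls.takeWhile (fun l => !pvIsHeader l)).filter
          (fun l => !(l == "") && !(PySem.Str.startswith l "## ")))) ::
        pvSegs (ls.dropWhile (fun l => !pvIsHeader l))).foldl (fun d kv => d.insert kv.1 kv.2) d := by
  induction ls with
  | nil =>
    intro d k vals hk hvals _
    simp [pvFinish, pvSegs_nil, pvFlush_eq vals hvals, hk]
  | cons l t ih =>
    intro d k vals hk hvals hls
    have hl : PySem.Str.strip l = l := hls l (by simp)
    have hlst : ∀ x ∈ t, PySem.Str.strip x = x := fun x hx => hls x (by simp [hx])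
    rw [List.foldl_cons]
    by_cases hhd : PySem.Chars.startswith l.toList ['#', '#', '#', ' '] = true
    · have hIs : pvIsHeader l = true := by rw [pvIsHeader_eq]; exact hhd
      have hstep : pvStepA (d, some k, vals) l =
          (d.insert k (pvFlushVal vals), some (pvKeyOf l), []) := by
        simp [pvStepA, hl, hhd, hk, pvKeyOf]
      rw [hstep, ih _ _ _ (pvKeyOf_ne l hl hIs) (by simp) hlst]
      simp [List.takeWhile_cons, List.dropWhile_cons, hIs, pvSegs_cons,
        pvFlush_eq vals hvals, pvValOf]
    · have hIs : pvIsHeader l = false := by rw [pvIsHeader_eq]; simpa using hhd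
      by_cases h2 : PySem.Chars.startswith l.toList ['#', '#', ' '] = true
      · have hstep : pvStepA (d, some k, vals) l = (d, some k, vals) := by
          simp [pvStepA, hl, hhd, h2]
        rw [hstep, ih _ _ _ hk hvals hlst]
        simp [List.takeWhile_cons, List.dropWhile_cons, hIs, List.filter_cons,
          PySem.Str.startswith, h2]
      · by_cases h3 : l = ""
        · subst h3
          have hstep : pvStepA (d, some k, vals) "" = (d, some k, vals) := by
            simp [pvStepA, PySem.Chars.strip, PySem.Chars.lstrip, PySem.Chars.rstrip,
              PySem.Chars.startswith, PySem.Str.strip, PySem.Str.startswith]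
          rw [hstep, ih _ _ _ hk hvals hlst]
          simp [List.takeWhile_cons, List.dropWhile_cons, hIs, List.filter_cons]
        · have hstep : pvStepA (d, some k, vals) l = (d, some k, vals ++ [l]) := by
            simp [pvStepA, hl, hhd, h2, h3]
          have hvals' : ∀ v ∈ vals ++ [l], PySem.Str.strip v = v ∧ v ≠ "" := by
            intro v hv
            rcases List.mem_append.mp hv with h | h
            · exact hvals v h
            · simp at h
              subst h
              exact ⟨hl, h3⟩
          rw [hstep, ih _ _ _ hk hvals' hlst]
          simp only [List.takeWhile_cons, List.dropWhile_cons, hIs, Bool.not_false, if_true,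
            List.filter_cons]
          have hpred : (!(l == "") && !(PySem.Str.startswith l "## ")) = true := by
            simp [PySem.Str.startswith, h2, h3]
          rw [hpred]
          simp [List.append_assoc]

-- Phase 0: no current key yet; everything up to the first header is discarded
theorem pvPhase0 (ls : List String) : ∀ (d : PySem.Dict String String) (vals : List String),
    (∀ l ∈ ls, PySem.Str.strip l = l) →
    pvFinish (ls.foldl pvStepA (d, none, vals)) =
      (pvSegs (ls.dropWhile (fun l => !pvIsHeader l))).foldl (fun d kv => d.insert kv.1 kv.2) d := by
  induction ls with
  | nil =>
    intro d vals _
    simp [pvFinish, pvSegs_nil]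
  | cons l t ih =>
    intro d vals hls
    have hl : PySem.Str.strip l = l := hls l (by simp)
    have hlst : ∀ x ∈ t, PySem.Str.strip x = x := fun x hx => hls x (by simp [hx])
    rw [List.foldl_cons]
    by_cases hhd : PySem.Chars.startswith l.toList ['#', '#', '#', ' '] = true
    · have hIs : pvIsHeader l = true := by rw [pvIsHeader_eq]; exact hhd
      have hstep : pvStepA (d, none, vals) l = (d, some (pvKeyOf l), []) := by
        simp [pvStepA, hl, hhd, pvKeyOf]
      rw [hstep, pvPhase1 t _ _ _ (pvKeyOf_ne l hl hIs) (by simp) hlst]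
      simp [List.dropWhile_cons, hIs, pvSegs_cons, pvValOf]
    · have hIs : pvIsHeader l = false := by rw [pvIsHeader_eq]; simpa using hhd
      have hstep : ∃ vals', pvStepA (d, none, vals) l = (d, none, vals') := by
        by_cases h2 : PySem.Chars.startswith l.toList ['#', '#', ' '] = true
        · exact ⟨vals, by simp [pvStepA, hl, hhd, h2]⟩
        · by_cases h3 : l = ""
          · exact ⟨vals, by
              subst h3
              simp [pvStepA, PySem.Chars.strip, PySem.Chars.lstrip, PySem.Chars.rstrip,
                PySem.Chars.startswith, PySem.Str.strip, PySem.Str.startswith]⟩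
          · exact ⟨vals ++ [l], by simp [pvStepA, hl, hhd, h2, h3]⟩
      obtain ⟨vals', hstep⟩ := hstep
      rw [hstep, ih _ _ hlst]
      simp [List.dropWhile_cons, hIs]

-- ===== VERDICT (by name: the statement is the Claim_ definition above) =====
theorem parse_issue_body_spec : Claim_equal_parse_issue_body := by
  unfold Claim_equal_parse_issue_body Spec_parse_issue_body
  intro body _
  simp only [parse_issue_body, parse_issue_body_alt]
  have hstep : (fun (st : PySem.Dict String String × Option String × List String) (raw : String) =>
      pvStepA st (PySem.Str.strip raw)) = pvStepA := by
    funext st raw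
    simp only [pvStepA, pvStrip_idem_str]
  have hfold :
      ((PySem.Str.split? body "\n").getD []).foldl pvStepA
          ((PySem.Dict.empty : PySem.Dict String String), none, ([] : List String)) =
        (((PySem.Str.split? body "\n").getD []).map PySem.Str.strip).foldl pvStepA
          (PySem.Dict.empty, none, []) := by
    rw [List.foldl_map, hstep]
  have hmem : ∀ l ∈ ((PySem.Str.split? body "\n").getD []).map PySem.Str.strip,
      PySem.Str.strip l = l := by
    intro l hl
    obtain ⟨w, _, hw⟩ := List.mem_map.mp hl
    subst hw
    exact pvStrip_idem_str w
  have h0 := pvPhase0 (((PySem.Str.split? body "\n").getD []).map PySem.Str.strip)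
    PySem.Dict.empty [] hmem
  rw [hfold]
  exact congrArg PySem.Dict.items h0
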